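-- pv_equiv track=rewrite | github.com/aniqfakhrul/Sharperner-Discordbot | main.py | search
-- ===== SOURCE A (Python) =====
-- def query_list(data, keyword):
--     found = False
--     for line in data:
--         if all(word in line.lower() for word in keyword):
--             found = True
--     return found
--
-- def search(content, keyword):
--     result = []
--     temp_list = []
--     for line in content:
--         line = line.strip()
--
--         ### temp_list.append(line)
--
--         ###if len(line.strip() == 0) and len(temp_list)>1:
--         if line.startswith("#") or (line.strip().startswith("[") and line.strip().endswith("]")) and len(temp_list)>1:
--             # search lah
--             if query_list(temp_list, keyword):
--                 temp_list = [i for i in temp_list if i]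
--                 result.append(list(temp_list))
--
--             # clearkan temp_list
--             temp_list.clear()
--
--         temp_list.append(line)
--     temp_list.clear()
--     return result
-- ===== SOURCE B (Python) =====
-- def search(content, keyword):
--     # Strip once, then locate block boundaries by index: a header is '#...'
--     # or a '[...]' line more than one position past the current block start.
--     # Completed blocks are the index ranges between consecutive headers (the
--     # trailing open range is never recorded); match and clean them by slicing.
--     lines = [raw.strip() for raw in content]
--     bounds = []
--     start = 0
--     for i, line in enumerate(lines):
--         if line.startswith("#") or (line.startswith("[") and line.endswith("]") and i - start > 1):
--             bounds.append((start, i))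
--             start = i
--     result = []
--     for s, e in bounds:
--         block = lines[s:e]
--         if any(all(word in l.lower() for word in keyword) for l in block):
--             result.append([l for l in block if l])
--     return result
-- ===== Notes on version B (the rewrite author's own statement) =====
-- stated objective: alternative
-- what changed: B never maintains A's mutable temp buffer: it strips all lines once, computes the list of (start,end) index boundaries of completed blocks in an index scan, and then materialises, tests and cleans each block by slicing lines[s:e].
import Mathlib
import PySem

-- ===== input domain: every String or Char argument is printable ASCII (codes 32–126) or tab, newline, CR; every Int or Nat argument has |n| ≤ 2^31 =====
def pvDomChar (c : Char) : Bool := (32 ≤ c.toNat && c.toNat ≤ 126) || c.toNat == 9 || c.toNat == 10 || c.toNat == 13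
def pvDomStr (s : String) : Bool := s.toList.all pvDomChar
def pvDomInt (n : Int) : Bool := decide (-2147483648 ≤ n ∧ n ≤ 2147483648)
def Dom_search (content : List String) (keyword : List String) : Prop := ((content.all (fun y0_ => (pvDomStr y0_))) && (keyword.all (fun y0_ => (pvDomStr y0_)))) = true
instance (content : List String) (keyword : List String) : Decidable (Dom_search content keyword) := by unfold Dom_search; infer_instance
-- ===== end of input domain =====

-- B replaces A's mutable temp buffer with an index scan that records (start,end)
-- boundaries of completed blocks and then slices, tests and cleans each block;
-- objective: alternative decomposition.

-- ===== PORT A =====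
def query_list (data : List String) (keyword : List String) : Bool :=
  data.foldl (fun found line =>
    if keyword.all (fun word => PySem.Str.isIn word (PySem.Str.lower line)) then true else found) false

def searchStep (keyword : List String) (st : List (List String) × List String) (raw : String) :
    List (List String) × List String :=
  let line := PySem.Str.strip raw
  let st :=
    if PySem.Str.startswith line "#" ||
       (PySem.Str.startswith (PySem.Str.strip line) "[" &&
        PySem.Str.endswith (PySem.Str.strip line) "]" && decide (st.2.length > 1)) then
      let st :=
        if query_list st.2 keyword then
          (st.1 ++ [st.2.filter (fun i => !(i == ""))], st.2)
        else st
      (st.1, ([] : List String))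
    else st
  (st.1, st.2 ++ [line])

def search (content : List String) (keyword : List String) : List (List String) :=
  (content.foldl (searchStep keyword) ([], [])).1

-- ===== PORT B =====
def matchesB (block : List String) (keyword : List String) : Bool :=
  block.any (fun line => keyword.all (fun word => PySem.Str.isIn word (PySem.Str.lower line)))

def boundsStep (st : List (Int × Int) × Int) (p : Int × String) : List (Int × Int) × Int :=
  if PySem.Str.startswith p.2 "#" ||
     (PySem.Str.startswith p.2 "[" && PySem.Str.endswith p.2 "]" && decide (p.1 - st.2 > 1)) then
    (st.1 ++ [(st.2, p.1)], p.1)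
  else st

def search_alt (content : List String) (keyword : List String) : List (List String) :=
  let lines := content.map PySem.Str.strip
  let bounds := ((PySem.List.enumerate lines 0).foldl boundsStep ([], 0)).1
  bounds.foldl (fun result b =>
    let block := PySem.List.slice lines (some b.1) (some b.2)
    if matchesB block keyword then result ++ [block.filter (fun x => !(x == ""))] else result) []

-- ===== PRECONDITION & SPEC =====
def Spec_search (content : List String) (keyword : List String) (out : List (List String)) : Prop := out = search_alt content keyword
instance (content : List String) (keyword : List String) (out : List (List String)) : Decidable (Spec_search content keyword out) := by unfold Spec_search; infer_instance

-- ===== CLAIM (what is proved, stated in full; the proofs are below) =====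
def Claim_equal_search : Prop := ∀ (content : List String) (keyword : List String), Dom_search content keyword → Spec_search content keyword (search content keyword)

-- ===== LEMMAS AND PROOFS =====

-- abstract pass on already-stripped lines (proof helper; mirrors A's loop without the strips)
def stepP (st : List (List String) × List String) (line : String) :
    List (List String) × List String :=
  if PySem.Str.startswith line "#" ||
     (PySem.Str.startswith line "[" && PySem.Str.endswith line "]" && decide (st.2.length > 1)) then
    (st.1 ++ [st.2], [line])
  else
    (st.1, st.2 ++ [line])

def sliceF (lines : List String) (b : Int × Int) : List String :=
  PySem.List.slice lines (some b.1) (some b.2)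

def renderB (keyword : List String) (blocks : List (List String)) : List (List String) :=
  (blocks.filter (fun blk => matchesB blk keyword)).map (fun blk => blk.filter (fun x => !(x == "")))

theorem dropWhile_idem {α : Type} (p : α → Bool) (l : List α) :
    List.dropWhile p (List.dropWhile p l) = List.dropWhile p l := by
  induction l with
  | nil => simp
  | cons a t ih =>
    by_cases h : p a = true
    · simpa [List.dropWhile, h] using ih
    · simp [List.dropWhile, h]

theorem foldl_flag {A : Type} (p : A → Bool) :
    ∀ (l : List A) (b : Bool),
      l.foldl (fun found x => if p x then true else found) b = (b || l.any p) := by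
  intro l
  induction l with
  | nil => intro b; simp
  | cons a t ih =>
    intro b
    rw [List.foldl_cons, ih]
    by_cases h : p a = true <;> cases b <;> simp [h]

theorem chars_strip_idem (cs : List Char) :
    PySem.Chars.strip (PySem.Chars.strip cs) = PySem.Chars.strip cs := by
  simp only [PySem.Chars.strip, PySem.Chars.lstrip, PySem.Chars.rstrip]
  set p := PySem.Chars.isspace with hp
  set l := List.dropWhile p cs with hl
  set m := List.dropWhile p l.reverse with hm
  have hlfix : List.dropWhile p l = l := by rw [hl]; exact dropWhile_idem p cs
  have hmfix : List.dropWhile p m = m := by rw [hm]; exact dropWhile_idem p l.reverse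
  have hstep : List.dropWhile p m.reverse = m.reverse := by
    rw [List.dropWhile_eq_self_iff]
    intro hlen
    have h1 : m <:+ l.reverse := by rw [hm]; exact List.dropWhile_suffix p
    have h2 : m.reverse <+: l := by
      have := (List.reverse_prefix (l₁ := m) (l₂ := l.reverse)).mpr h1
      simpa using this
    have hl0 : 0 < l.length := lt_of_lt_of_le hlen h2.length_le
    have hget : m.reverse[0]'hlen = l[0]'hl0 := List.IsPrefix.getElem h2 hlen
    rw [hget]
    exact (List.dropWhile_eq_self_iff.mp hlfix) hl0
  rw [hstep, List.reverse_reverse, hmfix]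

theorem strip_idem (s : String) : PySem.Str.strip (PySem.Str.strip s) = PySem.Str.strip s := by
  have h : (PySem.Str.strip (PySem.Str.strip s)).toList = (PySem.Str.strip s).toList := by
    simp [PySem.Str.toList_strip, chars_strip_idem]
  exact String.toList_inj.mp h

theorem query_list_eq_any (data keyword : List String) :
    query_list data keyword = matchesB data keyword := by
  unfold query_list matchesB
  rw [foldl_flag]
  simp

theorem renderB_append (keyword : List String) (blocks : List (List String)) (blk : List String) :
    renderB keyword (blocks ++ [blk]) =
      renderB keyword blocks ++
        (if matchesB blk keyword then [blk.filter (fun x => !(x == ""))] else []) := by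
  by_cases h : matchesB blk keyword = true <;>
    simp [renderB, List.filter_append, h]

-- A's loop equals the abstract split pass (on stripped lines) rendered at the end
theorem loop_invariant (keyword : List String) :
    ∀ (content : List String) (res blocks : List (List String)) (temp : List String),
      res = renderB keyword blocks →
      (content.foldl (searchStep keyword) (res, temp)).1 =
        renderB keyword (((content.map PySem.Str.strip).foldl stepP (blocks, temp)).1) := by
  intro content
  induction content with
  | nil => intro res blocks temp h; simpa using h
  | cons raw rest ih =>
    intro res blocks temp h
    simp only [List.foldl_cons, List.map_cons]
    have hcond : (PySem.Str.startswith (PySem.Str.strip raw) "#" ||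
        (PySem.Str.startswith (PySem.Str.strip (PySem.Str.strip raw)) "[" &&
         PySem.Str.endswith (PySem.Str.strip (PySem.Str.strip raw)) "]" &&
         decide (temp.length > 1)))
        = (PySem.Str.startswith (PySem.Str.strip raw) "#" ||
        (PySem.Str.startswith (PySem.Str.strip raw) "[" &&
         PySem.Str.endswith (PySem.Str.strip raw) "]" && decide (temp.length > 1))) := by
      rw [strip_idem]
    by_cases hc : (PySem.Str.startswith (PySem.Str.strip raw) "#" ||
        (PySem.Str.startswith (PySem.Str.strip raw) "[" &&
         PySem.Str.endswith (PySem.Str.strip raw) "]" && decide (temp.length > 1))) = true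
    · have hA : searchStep keyword (res, temp) raw =
        ((if query_list temp keyword then res ++ [temp.filter (fun i => !(i == ""))] else res),
          [PySem.Str.strip raw]) := by
        simp only [searchStep, hcond, hc, if_true]
        by_cases hq : query_list temp keyword = true <;> simp [hq]
      have hB : stepP (blocks, temp) (PySem.Str.strip raw) = (blocks ++ [temp], [PySem.Str.strip raw]) := by
        simp only [stepP, hc, if_true]
      rw [hA, hB]
      apply ih
      rw [renderB_append, query_list_eq_any, h]
      by_cases hq : matchesB temp keyword = true <;> simp [hq]
    · have hA : searchStep keyword (res, temp) raw = (res, temp ++ [PySem.Str.strip raw]) := by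
        simp only [searchStep, hcond, hc]
        simp
      have hB : stepP (blocks, temp) (PySem.Str.strip raw) = (blocks, temp ++ [PySem.Str.strip raw]) := by
        simp only [stepP, hc]
        simp
      rw [hA, hB]
      exact ih _ _ _ h

-- B's boundary scan produces, through slicing, the blocks of the abstract split pass
theorem bounds_invariant (lines : List String) :
    ∀ (suffix : List String) (i start : Nat) (bnds : List (Int × Int)),
      lines.drop i = suffix → start ≤ i →
      ((suffix.foldl stepP
          (bnds.map (sliceF lines), (lines.drop start).take (i - start))).1)
        = ((PySem.List.enumerate suffix (i : Int)).foldl boundsStep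
            (bnds, (start : Int))).1.map (sliceF lines) := by
  intro suffix
  induction suffix with
  | nil => intro i start bnds _ _; simp [PySem.List.enumerate_nil]
  | cons x rest ih =>
    intro i start bnds hdrop hle
    have hi : i < lines.length := by
      by_contra hnot
      have : lines.drop i = [] := List.drop_eq_nil_of_le (by omega)
      rw [hdrop] at this; exact absurd this (by simp)
    have hx : lines[i]? = some x := by
      have h0 : (lines.drop i)[0]? = lines[i + 0]? := List.getElem?_drop
      rw [hdrop] at h0; simpa using h0.symm
    have hrest : lines.drop (i + 1) = rest := by
      have : lines.drop (i + 1) = (lines.drop i).drop 1 := by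
        rw [List.drop_drop]
      rw [this, hdrop]; simp
    have htemplen : ((lines.drop start).take (i - start)).length = i - start := by
      simp [List.length_take, List.length_drop]; omega
    have hcond : decide (((lines.drop start).take (i - start)).length > 1)
        = decide ((i : Int) - (start : Int) > 1) := by
      rw [htemplen]; simp only [decide_eq_decide]; omega
    rw [PySem.List.enumerate_cons]
    simp only [List.foldl_cons]
    by_cases hc : (PySem.Str.startswith x "#" ||
        (PySem.Str.startswith x "[" && PySem.Str.endswith x "]" &&
         decide ((i : Int) - (start : Int) > 1))) = true
    · have hP : stepP (bnds.map (sliceF lines), (lines.drop start).take (i - start)) x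
          = (bnds.map (sliceF lines) ++ [(lines.drop start).take (i - start)], [x]) := by
        simp only [stepP, hcond, hc, if_true]
      have hQ : boundsStep (bnds, (start : Int)) ((i : Int), x)
          = (bnds ++ [((start : Int), (i : Int))], (i : Int)) := by
        simp only [boundsStep, hc, if_true]
      rw [hP, hQ]
      have hslice : sliceF lines ((start : Int), (i : Int))
          = (lines.drop start).take (i - start) := by
        simp [sliceF, PySem.List.slice_natCast]
      have hmap : (bnds ++ [((start : Int), (i : Int))]).map (sliceF lines)
          = bnds.map (sliceF lines) ++ [(lines.drop start).take (i - start)] := by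
        simp [hslice]
      have hnewtemp : (lines.drop i).take ((i + 1) - i) = [x] := by
        rw [hdrop]; simp
      have := ih (i + 1) i (bnds ++ [((start : Int), (i : Int))]) hrest (by omega)
      rw [hmap, hnewtemp] at this
      exact this
    · have hP : stepP (bnds.map (sliceF lines), (lines.drop start).take (i - start)) x
          = (bnds.map (sliceF lines), (lines.drop start).take (i - start) ++ [x]) := by
        simp only [stepP, hcond, hc]; simp
      have hQ : boundsStep (bnds, (start : Int)) ((i : Int), x) = (bnds, (start : Int)) := by
        simp only [boundsStep]
        rw [if_neg]; simpa using hc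
      rw [hP, hQ]
      have hgrow : (lines.drop start).take (i - start) ++ [x]
          = (lines.drop start).take ((i + 1) - start) := by
        have h1 : (i + 1) - start = (i - start) + 1 := by omega
        rw [h1, List.take_add_one]
        have : (lines.drop start)[i - start]? = some x := by
          rw [List.getElem?_drop]
          have : start + (i - start) = i := by omega
          rw [this, hx]
        simp [this]
      rw [hgrow]
      exact ih (i + 1) start bnds hrest (by omega)

-- B's second loop is renderB of the sliced blocks
theorem result_fold_gen (keyword : List String) (lines : List String) :
    ∀ (bounds : List (Int × Int)) (acc : List (List String)),
      bounds.foldl (fun result b =>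
        let block := PySem.List.slice lines (some b.1) (some b.2)
        if matchesB block keyword then result ++ [block.filter (fun x => !(x == ""))] else result) acc
      = acc ++ renderB keyword (bounds.map (sliceF lines)) := by
  intro bounds
  induction bounds with
  | nil => intro acc; simp [renderB]
  | cons b rest ih =>
    intro acc
    rw [List.foldl_cons, ih]
    by_cases h : matchesB (PySem.List.slice lines (some b.1) (some b.2)) keyword = true <;>
      simp [renderB, sliceF, h]

theorem result_fold (keyword : List String) (lines : List String) (bounds : List (Int × Int)) :
    bounds.foldl (fun result b =>
      let block := PySem.List.slice lines (some b.1) (some b.2)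
      if matchesB block keyword then result ++ [block.filter (fun x => !(x == ""))] else result) []
    = renderB keyword (bounds.map (sliceF lines)) := by
  simpa using result_fold_gen keyword lines bounds []

-- ===== VERDICT (by name: the statement is the Claim_ definition above) =====
theorem search_spec : Claim_equal_search := by
  intro content keyword _
  unfold Spec_search search search_alt
  rw [loop_invariant keyword content [] [] [] (by simp [renderB])]
  rw [result_fold]
  congr 1
  have := bounds_invariant (content.map PySem.Str.strip) (content.map PySem.Str.strip) 0 0 []
    (by simp) (by omega)
  simpa using this
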